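-- pv_equiv track=rewrite | github.com/datboi2001/DSA | Graph/Minimum_Spanning_Tree/mst_forest.py | mst_forest
-- ===== SOURCE A (Python) =====
-- from typing import List, Tuple
--
-- class UnionFind:
--     def __init__(self):
--         self.id = {}
--
--     def find(self, x):
--         y = self.id.get(x, x)
--         if y != x:
--             self.id[x] = y = self.find(y)
--         return y
--
--     def union(self, x, y):
--         self.id[self.find(x)] = self.find(y)
--
-- def mst_forest(trees : int, pairs : List[Tuple[int]]) -> int:
--     # sort list, make sure to define custom comparator class cmp to sort edge based on weight from lowest to highest
--     pairs.sort(key = lambda pair: pair[2])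
--     dsu = UnionFind()
--     ret = 0
--     for pair in pairs:
--       # check if pairs belong to same set before merging and adding edge to mst
--       if dsu.find(pair[0]) != dsu.find(pair[1]):
--         dsu.union(pair[0], pair[1])
--         ret += pair[2]
--     return ret
-- ===== SOURCE B (Python) =====
-- from typing import List, Tuple
--
-- def mst_forest(trees : int, pairs : List[Tuple[int]]) -> int:
--     # Kruskal with a flat vertex -> component-representative map (no union-find class,
--     # no recursion): merging relabels one component in a dict comprehension.
--     comp = {}
--     total = 0
--     for u, v, w in sorted(pairs, key=lambda p: p[2]):
--         ru = comp.get(u, u)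
--         rv = comp.get(v, v)
--         if ru != rv:
--             comp = {x: (rv if r == ru else r) for x, r in comp.items()}
--             comp[u] = rv
--             comp[v] = rv
--             total += w
--     return total
-- ===== Notes on version B (the rewrite author's own statement) =====
-- stated objective: simpler
-- what changed: Replaces the recursive path-compressed UnionFind class by a flat vertex-to-representative dict that is relabelled with a dict comprehension on each merge (and uses sorted() instead of an in-place sort, so B does not mutate `pairs`).
import Mathlib
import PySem

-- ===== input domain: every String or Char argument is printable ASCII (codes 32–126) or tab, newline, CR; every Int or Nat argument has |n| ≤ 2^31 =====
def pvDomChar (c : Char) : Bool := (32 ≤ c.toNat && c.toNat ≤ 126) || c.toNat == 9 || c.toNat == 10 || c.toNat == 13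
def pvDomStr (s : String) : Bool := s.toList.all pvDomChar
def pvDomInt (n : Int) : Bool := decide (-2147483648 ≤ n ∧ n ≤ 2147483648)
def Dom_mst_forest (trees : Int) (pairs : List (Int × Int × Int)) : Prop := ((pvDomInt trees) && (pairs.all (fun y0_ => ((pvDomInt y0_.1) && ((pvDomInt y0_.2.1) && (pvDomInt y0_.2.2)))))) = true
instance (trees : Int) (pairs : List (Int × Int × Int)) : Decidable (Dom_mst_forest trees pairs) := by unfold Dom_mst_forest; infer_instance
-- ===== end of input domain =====

-- B replaces the recursive path-compressed UnionFind class by a flat vertex→representative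
-- dict relabelled on each merge (objective: simpler). Return values agree; A additionally
-- sorts `pairs` in place (a side effect B does not reproduce) — the claim is about the return value.

-- ===== PORT A =====
-- UnionFind.find with path compression; `fuel` only makes the recursion structurally
-- terminating (every dict A builds is an acyclic parent forest, so fuel d.size+1 is
-- never exhausted on states the program reaches — proved via the GoodA invariant below).
def ufFind (fuel : Nat) (d : PySem.Dict Int Int) (x : Int) : Int × PySem.Dict Int Int :=
  match fuel with
  | 0 => (x, d)
  | fuel + 1 =>
    let y := d.getD x x
    if y = x then (x, d)
    else
      let p := ufFind fuel d y
      (p.1, p.2.insert x p.1)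

-- UnionFind.union: Python's `self.id[self.find(x)] = self.find(y)` evaluates find(y) first.
def ufUnion (d : PySem.Dict Int Int) (x y : Int) : PySem.Dict Int Int :=
  let q := ufFind (d.size + 1) d y
  let p := ufFind (q.2.size + 1) q.2 x
  p.2.insert p.1 q.1

def mstLoop (st : PySem.Dict Int Int × Int) (pair : Int × Int × Int) : PySem.Dict Int Int × Int :=
  let p := ufFind (st.1.size + 1) st.1 pair.1
  let q := ufFind (p.2.size + 1) p.2 pair.2.1
  if p.1 ≠ q.1 then (ufUnion q.2 pair.1 pair.2.1, st.2 + pair.2.2)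
  else (q.2, st.2)

def mst_forest (trees : Int) (pairs : List (Int × Int × Int)) : Int :=
  ((PySem.List.sorted pairs (fun pair => pair.2.2) false).foldl mstLoop (PySem.Dict.empty, 0)).2

-- ===== PORT B =====
-- the dict comprehension {x: (rv if r == ru else r) for x, r in comp.items()}
def relabel (comp : PySem.Dict Int Int) (ru rv : Int) : PySem.Dict Int Int :=
  PySem.Dict.mk (comp.items.map (fun p => (p.1, if p.2 = ru then rv else p.2)))

def altLoop (st : PySem.Dict Int Int × Int) (pr : Int × Int × Int) : PySem.Dict Int Int × Int :=
  let ru := st.1.getD pr.1 pr.1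
  let rv := st.1.getD pr.2.1 pr.2.1
  if ru ≠ rv then (((relabel st.1 ru rv).insert pr.1 rv).insert pr.2.1 rv, st.2 + pr.2.2)
  else (st.1, st.2)

def mst_forest_alt (trees : Int) (pairs : List (Int × Int × Int)) : Int :=
  ((PySem.List.sorted pairs (fun pr => pr.2.2) false).foldl altLoop (PySem.Dict.empty, 0)).2

-- ===== PRECONDITION & SPEC =====
def Spec_mst_forest (trees : Int) (pairs : List (Int × Int × Int)) (out : Int) : Prop := out = mst_forest_alt trees pairs
instance (trees : Int) (pairs : List (Int × Int × Int)) (out : Int) : Decidable (Spec_mst_forest trees pairs out) := by unfold Spec_mst_forest; infer_instance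

-- ===== CLAIM (what is proved, stated in full; the proofs are below) =====
def Claim_equal_mst_forest : Prop := ∀ (trees : Int) (pairs : List (Int × Int × Int)), Dom_mst_forest trees pairs → Spec_mst_forest trees pairs (mst_forest trees pairs)

-- ===== LEMMAS AND PROOFS =====

-- parent function of A's union-find dict, and its iteration
def par (d : PySem.Dict Int Int) (x : Int) : Int := d.getD x x

def piter (d : PySem.Dict Int Int) : Nat → Int → Int
  | 0, x => x
  | n + 1, x => piter d n (par d x)

def isRoot (d : PySem.Dict Int Int) (x : Int) : Prop := par d x = x

def Reach (d : PySem.Dict Int Int) (x r : Int) : Prop := ∃ n, piter d n x = r ∧ isRoot d r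

-- every vertex reaches a root within d.size steps
def GoodA (d : PySem.Dict Int Int) : Prop := ∀ x, ∃ r, ∃ n ≤ d.size, piter d n x = r ∧ isRoot d r

def NoSelf (d : PySem.Dict Int Int) : Prop := ∀ k, d.get? k ≠ some k

def FlatB (c : PySem.Dict Int Int) : Prop := ∀ k v, c.get? k = some v → c.get? v = some v

-- A's reachable roots are exactly B's flat map
def Corr (d c : PySem.Dict Int Int) : Prop := ∀ x r, Reach d x r → c.getD x x = r

def SimInv (d c : PySem.Dict Int Int) : Prop := GoodA d ∧ NoSelf d ∧ FlatB c ∧ Corr d c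

theorem piter_add (d : PySem.Dict Int Int) (a b : Nat) (x : Int) :
    piter d (a + b) x = piter d b (piter d a x) := by
  induction a generalizing x with
  | zero => simp [piter]
  | succ a ih => simpa [piter, Nat.succ_add] using ih (par d x)

theorem piter_root (d : PySem.Dict Int Int) (r : Int) (h : isRoot d r) (n : Nat) :
    piter d n r = r := by
  induction n with
  | zero => rfl
  | succ n ih =>
    show piter d n (par d r) = r
    rw [h]; exact ih

theorem par_insert (d : PySem.Dict Int Int) (k v x : Int) :
    par (d.insert k v) x = if x = k then v else par d x := by
  simp [par, PySem.Dict.getD_insert]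

theorem Reach_unique {d : PySem.Dict Int Int} {x r r' : Int}
    (h1 : Reach d x r) (h2 : Reach d x r') : r = r' := by
  obtain ⟨n, hn, hr⟩ := h1
  obtain ⟨m, hm, hr'⟩ := h2
  rcases Nat.le_total n m with h | h
  · have : piter d m x = r := by
      have hadd := piter_add d n (m - n) x
      rw [Nat.add_sub_cancel' h] at hadd
      rw [hadd, hn, piter_root d r hr]
    rw [this] at hm; exact hm
  · have : piter d n x = r' := by
      have hadd := piter_add d m (n - m) x
      rw [Nat.add_sub_cancel' h] at hadd
      rw [hadd, hm, piter_root d r' hr']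
    rw [this] at hn; exact hn.symm

-- roots are unchanged by inserting k ↦ v with k not a root and v ≠ k
theorem isRoot_insert_iff {d : PySem.Dict Int Int} {k v : Int}
    (hk : ¬ isRoot d k) (hvk : v ≠ k) (w : Int) :
    isRoot (d.insert k v) w ↔ isRoot d w := by
  unfold isRoot
  rw [par_insert]
  by_cases hw : w = k
  · subst hw
    rw [if_pos rfl]
    constructor
    · intro h; exact absurd h hvk
    · intro h; exact absurd h hk
  · simp [hw]

-- path-compression insert preserves reachability, with no more steps
theorem compress_preserve {d : PySem.Dict Int Int} {k v : Int}
    (hk : ¬ isRoot d k) (hv : isRoot d v) (hkv : Reach d k v) :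
    ∀ n z r, piter d n z = r → isRoot d r →
      ∃ m ≤ n, piter (d.insert k v) m z = r ∧ isRoot (d.insert k v) r := by
  have hvk : v ≠ k := by
    intro h; exact hk (h ▸ hv)
  intro n
  induction n with
  | zero =>
    intro z r hz hr
    exact ⟨0, le_refl _, hz, (isRoot_insert_iff hk hvk r).mpr hr⟩
  | succ n ih =>
    intro z r hz hr
    by_cases hzk : z = k
    · have hrv : r = v := by
        refine Reach_unique ⟨n + 1, ?_, hr⟩ hkv
        rw [← hzk]; exact hz
      rw [hrv, hzk]
      refine ⟨1, by omega, ?_, (isRoot_insert_iff hk hvk v).mpr hv⟩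
      show piter (d.insert k v) 0 (par (d.insert k v) k) = v
      rw [par_insert]; simp [piter]
    · have hz' : piter d n (par d z) = r := hz
      obtain ⟨m, hm, hpm, hrm⟩ := ih (par d z) r hz' hr
      refine ⟨m + 1, by omega, ?_, hrm⟩
      show piter (d.insert k v) m (par (d.insert k v) z) = r
      rw [par_insert, if_neg hzk]; exact hpm

-- union insert k ↦ v (both roots, k ≠ v) redirects class k to v
theorem union_shift {d : PySem.Dict Int Int} {k v : Int}
    (hk : isRoot d k) (hv : isRoot d v) (hne : k ≠ v) :
    ∀ n z r, piter d n z = r → isRoot d r →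
      ∃ m ≤ n + 1, piter (d.insert k v) m z = (if r = k then v else r) ∧
        isRoot (d.insert k v) (if r = k then v else r) := by
  have hroot' : isRoot (d.insert k v) v := by
    unfold isRoot; rw [par_insert, if_neg (Ne.symm hne)]; exact hv
  have hgoal : ∀ r, isRoot d r → isRoot (d.insert k v) (if r = k then v else r) := by
    intro r hr
    by_cases hrk : r = k
    · simp [hrk, hroot']
    · rw [if_neg hrk]
      unfold isRoot; rw [par_insert, if_neg hrk]; exact hr
  intro n
  induction n with
  | zero =>
    intro z r hz hr
    subst hz
    by_cases hzk : z = k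
    · refine ⟨1, by omega, ?_, hgoal z hr⟩
      show piter (d.insert k v) 0 (par (d.insert k v) z) = _
      rw [par_insert, if_pos hzk]; simp [piter, hzk]
    · exact ⟨0, by omega, by simp [piter, hzk], hgoal z hr⟩
  | succ n ih =>
    intro z r hz hr
    by_cases hzk : z = k
    · have hzz : piter d (n + 1) z = z := by
        rw [hzk]; exact hzk ▸ piter_root d k hk (n + 1)
      rw [hzz] at hz; subst hz
      refine ⟨1, by omega, ?_, hgoal z hr⟩
      show piter (d.insert k v) 0 (par (d.insert k v) z) = _
      rw [par_insert, if_pos hzk]; simp [piter, hzk]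
    · have hz' : piter d n (par d z) = r := hz
      obtain ⟨m, hm, hpm, hrm⟩ := ih (par d z) r hz' hr
      refine ⟨m + 1, by omega, ?_, hrm⟩
      show piter (d.insert k v) m (par (d.insert k v) z) = _
      rw [par_insert, if_neg hzk]; exact hpm

theorem contains_of_getD_ne {d : PySem.Dict Int Int} {x : Int}
    (h : d.getD x x ≠ x) : d.contains x = true := by
  by_cases hc : d.contains x = true
  · exact hc
  · exact absurd (PySem.Dict.getD_of_not_contains d x (by simpa using hc)) h

theorem not_contains_of_root_noself {d : PySem.Dict Int Int} {r : Int}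
    (hr : isRoot d r) (hns : NoSelf d) : d.contains r = false := by
  cases hg : d.get? r with
  | none => rw [PySem.Dict.contains_eq_isSome_get?, hg]; rfl
  | some w =>
    have : d.getD r r = w := by rw [PySem.Dict.getD_eq_get?_getD, hg]; rfl
    have hwr : w = r := by rw [← this]; exact hr
    subst hwr
    exact absurd hg (hns w)

-- the master lemma about A's find: it returns the root, preserves reachability
-- (with no more steps), the root set, the size, and NoSelf
theorem find_spec :
    ∀ (fuel : Nat) (d : PySem.Dict Int Int) (x : Int) (n : Nat) (r : Int),
      n ≤ fuel → piter d n x = r → isRoot d r → NoSelf d →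
      (ufFind fuel d x).1 = r ∧
      (∀ m z s, piter d m z = s → isRoot d s →
        ∃ m' ≤ m, piter (ufFind fuel d x).2 m' z = s ∧ isRoot (ufFind fuel d x).2 s) ∧
      (∀ w, isRoot (ufFind fuel d x).2 w ↔ isRoot d w) ∧
      (ufFind fuel d x).2.size = d.size ∧
      NoSelf (ufFind fuel d x).2 := by
  intro fuel
  induction fuel with
  | zero =>
    intro d x n r hn hx hr hns
    interval_cases n
    subst hx
    exact ⟨rfl, fun m z s h1 h2 => ⟨m, le_refl _, h1, h2⟩, fun w => Iff.rfl, rfl, hns⟩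
  | succ fuel ih =>
    intro d x n r hn hx hr hns
    by_cases hy : d.getD x x = x
    · have hxroot : isRoot d x := hy
      have hrx : r = x := by
        rw [piter_root d x hxroot n] at hx; exact hx.symm
      subst hrx
      simp only [ufFind, hy]
      exact ⟨rfl, fun m z s h1 h2 => ⟨m, le_refl _, h1, h2⟩, fun w => Iff.rfl, rfl, hns⟩
    · have hnx : ¬ isRoot d x := hy
      have hn1 : 1 ≤ n := by
        rcases Nat.eq_zero_or_pos n with h | h
        · subst h
          have hxr : x = r := hx
          rw [← hxr] at hr
          exact absurd hr hnx
        · exact h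
      have hx' : piter d (n - 1) (d.getD x x) = r := by
        have hstep : piter d n x = piter d (n - 1) (par d x) := by
          rw [show n = (n - 1) + 1 by omega]
          rfl
        rw [hstep] at hx; exact hx
      obtain ⟨ha, hb, hc, hd, he⟩ := ih d (d.getD x x) (n - 1) r (by omega) hx' hr hns
      simp only [ufFind, if_neg hy]
      set p := ufFind fuel d (d.getD x x) with hp
      rw [ha]
      have hnxp : ¬ isRoot p.2 x := fun h => hnx ((hc x).mp h)
      have hrp : isRoot p.2 r := (hc r).mpr hr
      have hreach : Reach p.2 x r := by
        obtain ⟨m', _, h1, h2⟩ := hb n x r hx hr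
        exact ⟨m', h1, h2⟩
      have hrne : r ≠ x := fun h => hnx (h ▸ hr)
      refine ⟨rfl, ?_, ?_, ?_, ?_⟩
      · intro m z s h1 h2
        obtain ⟨m1, hm1, h3, h4⟩ := hb m z s h1 h2
        obtain ⟨m2, hm2, h5, h6⟩ := compress_preserve hnxp hrp hreach m1 z s h3 h4
        exact ⟨m2, le_trans hm2 hm1, h5, h6⟩
      · intro w
        rw [isRoot_insert_iff hnxp hrne w]
        exact hc w
      · rw [PySem.Dict.size_insert]
        have hne' : p.2.getD x x ≠ x := hnxp
        rw [if_pos (contains_of_getD_ne hne')]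
        exact hd
      · intro k
        rw [PySem.Dict.get?_insert]
        by_cases hk : k = x
        · subst hk; simp [hrne]
        · rw [if_neg hk]; exact he k

-- ===== B-side lemmas =====

theorem get?_relabel (c : PySem.Dict Int Int) (ru rv x : Int) :
    (relabel c ru rv).get? x = (c.get? x).map (fun r => if r = ru then rv else r) := by
  obtain ⟨l⟩ := c
  induction l with
  | nil => simp [relabel, PySem.Dict.get?]
  | cons p rest ih =>
    obtain ⟨k, v⟩ := p
    simp only [relabel, List.map_cons] at *
    rw [PySem.Dict.get?_mk_cons, PySem.Dict.get?_mk_cons]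
    by_cases hk : k = x
    · simp [hk]
    · simp only [beq_iff_eq, hk, if_false]
      exact ih

-- B's merged map realises the root substitution ru → rv
theorem getD_relabel_chain {c : PySem.Dict Int Int} {u v ru rv : Int}
    (hflat : FlatB c) (hru : c.getD u u = ru) (hrv : c.getD v v = rv) (hne : ru ≠ rv) :
    ∀ x, (((relabel c ru rv).insert u rv).insert v rv).getD x x =
      if c.getD x x = ru then rv else c.getD x x := by
  intro x
  rw [PySem.Dict.getD_insert, PySem.Dict.getD_insert]
  by_cases hxv : x = v
  · subst hxv
    rw [if_pos rfl, hrv, if_neg (fun h => hne h.symm)]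
  · rw [if_neg hxv]
    by_cases hxu : x = u
    · subst hxu
      rw [if_pos rfl, hru, if_pos rfl]
    · rw [if_neg hxu]
      rw [PySem.Dict.getD_eq_get?_getD, get?_relabel]
      cases hgx : c.get? x with
      | some r =>
        rw [PySem.Dict.getD_eq_get?_getD, hgx]
        simp [Option.getD]
      | none =>
        rw [PySem.Dict.getD_eq_get?_getD, hgx]
        simp only [Option.map_none, Option.getD_none]
        have hxru : x ≠ ru := by
          intro hxru
          by_cases hcu : c.contains u = true
          · have hsome : (c.get? u).isSome := by
              rw [← PySem.Dict.contains_eq_isSome_get?]; exact hcu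
            obtain ⟨w, hw⟩ := Option.isSome_iff_exists.mp hsome
            have hwu : w = ru := by
              rw [PySem.Dict.getD_eq_get?_getD, hw] at hru; exact hru
            subst hwu
            have hkey := hflat u w hw
            rw [hxru] at hgx
            rw [hkey] at hgx; simp at hgx
          · have heq : c.getD u u = u := PySem.Dict.getD_of_not_contains c u (by simpa using hcu)
            rw [heq] at hru
            exact hxu (hxru.trans hru.symm)
        simp [hxru]

theorem flatB_step {c : PySem.Dict Int Int} {u v ru rv : Int}
    (hflat : FlatB c) (hru : c.getD u u = ru) (hrv : c.getD v v = rv) (hne : ru ≠ rv) :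
    FlatB (((relabel c ru rv).insert u rv).insert v rv) := by
  have hrv_self : (((relabel c ru rv).insert u rv).insert v rv).get? rv = some rv := by
    rw [PySem.Dict.get?_insert]
    by_cases h : rv = v
    · simp [h]
    · rw [if_neg h, PySem.Dict.get?_insert]
      have hvkey : c.get? v = some rv := by
        by_cases hcv : c.contains v = true
        · have hsome : (c.get? v).isSome := by
            rw [← PySem.Dict.contains_eq_isSome_get?]; exact hcv
          obtain ⟨w, hw⟩ := Option.isSome_iff_exists.mp hsome
          have hwv : w = rv := by rw [PySem.Dict.getD_eq_get?_getD, hw] at hrv; exact hrv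
          rw [hwv] at hw; exact hw
        · have heq : c.getD v v = v := PySem.Dict.getD_of_not_contains c v (by simpa using hcv)
          rw [heq] at hrv
          exact absurd hrv.symm h
      by_cases h2 : rv = u
      · simp [h2]
      · rw [if_neg h2, get?_relabel, hflat v rv hvkey]
        simp
  intro k w hk
  rw [PySem.Dict.get?_insert, PySem.Dict.get?_insert] at hk
  by_cases hkv : k = v
  · rw [if_pos hkv] at hk
    cases hk; exact hrv_self
  · rw [if_neg hkv] at hk
    by_cases hku : k = u
    · rw [if_pos hku] at hk
      cases hk; exact hrv_self
    · rw [if_neg hku, get?_relabel] at hk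
      cases hck : c.get? k with
      | none => rw [hck] at hk; simp at hk
      | some r =>
        rw [hck] at hk
        simp only [Option.map_some, Option.some.injEq] at hk
        by_cases hr : r = ru
        · rw [if_pos hr] at hk; rw [← hk]; exact hrv_self
        · rw [if_neg hr] at hk
          rw [← hk]
          by_cases hwrv : r = rv
          · rw [hwrv]; exact hrv_self
          · have hwkey : c.get? r = some r := hflat k r hck
            rw [PySem.Dict.get?_insert, PySem.Dict.get?_insert]
            have hwv : r ≠ v := by
              intro h
              rw [h] at hwkey
              have hx : rv = v := by
                rw [PySem.Dict.getD_eq_get?_getD, hwkey] at hrv; exact hrv.symm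
              rw [h] at hwrv; exact hwrv hx.symm
            rw [if_neg hwv]
            have hwu : r ≠ u := by
              intro h
              rw [h] at hwkey
              have hx : ru = u := by
                rw [PySem.Dict.getD_eq_get?_getD, hwkey] at hru; exact hru.symm
              rw [h] at hr; exact hr hx.symm
            rw [if_neg hwu, get?_relabel, hwkey]
            simp [hr]

-- ===== the simulation =====

theorem corr_of_preserve {d d' c : PySem.Dict Int Int}
    (hgood : GoodA d) (hcorr : Corr d c)
    (hpres : ∀ z s, Reach d z s → Reach d' z s) :
    Corr d' c := by
  intro x r hx
  obtain ⟨r0, n, _, h1, h2⟩ := hgood x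
  have hr0 : Reach d' x r0 := hpres x r0 ⟨n, h1, h2⟩
  have heq := Reach_unique hx hr0
  subst heq
  exact hcorr x r ⟨n, h1, h2⟩

theorem step_sim (d c : PySem.Dict Int Int) (t : Int) (pr : Int × Int × Int)
    (hinv : SimInv d c) :
    (mstLoop (d, t) pr).2 = (altLoop (c, t) pr).2 ∧
    SimInv (mstLoop (d, t) pr).1 (altLoop (c, t) pr).1 := by
  obtain ⟨hgood, hns, hflat, hcorr⟩ := hinv
  obtain ⟨u, v, w⟩ := pr
  -- first find (on u)
  obtain ⟨r1, n1, hn1, hp1, hr1⟩ := hgood u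
  obtain ⟨ha1, hb1, hc1, hd1, he1⟩ :=
    find_spec (d.size + 1) d u n1 r1 (by omega) hp1 hr1 hns
  set p := ufFind (d.size + 1) d u with hpdef
  have hpres1 : ∀ z s, Reach d z s → Reach p.2 z s := by
    intro z s ⟨m, h1, h2⟩
    obtain ⟨m', _, h3, h4⟩ := hb1 m z s h1 h2
    exact ⟨m', h3, h4⟩
  have hgood1 : GoodA p.2 := by
    intro z
    obtain ⟨s, m, hm, h1, h2⟩ := hgood z
    obtain ⟨m', hm', h3, h4⟩ := hb1 m z s h1 h2
    exact ⟨s, m', by omega, h3, h4⟩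
  have hcorr1 : Corr p.2 c := corr_of_preserve hgood hcorr hpres1
  -- second find (on v), over p.2
  obtain ⟨r2, n2, hn2, hp2, hr2⟩ := hgood1 v
  obtain ⟨ha2, hb2, hc2, hd2, he2⟩ :=
    find_spec (p.2.size + 1) p.2 v n2 r2 (by omega) hp2 hr2 he1
  set q := ufFind (p.2.size + 1) p.2 v with hqdef
  have hpres2 : ∀ z s, Reach p.2 z s → Reach q.2 z s := by
    intro z s ⟨m, h1, h2⟩
    obtain ⟨m', _, h3, h4⟩ := hb2 m z s h1 h2
    exact ⟨m', h3, h4⟩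
  have hgood2 : GoodA q.2 := by
    intro z
    obtain ⟨s, m, hm, h1, h2⟩ := hgood1 z
    obtain ⟨m', hm', h3, h4⟩ := hb2 m z s h1 h2
    exact ⟨s, m', by omega, h3, h4⟩
  have hcorr2 : Corr q.2 c := corr_of_preserve hgood1 hcorr1 hpres2
  -- B's roots agree with A's find results
  have hru : c.getD u u = r1 := hcorr u r1 ⟨n1, hp1, hr1⟩
  have hrv : c.getD v v = r2 := hcorr1 v r2 ⟨n2, hp2, hr2⟩
  have hA : mstLoop (d, t) (u, v, w) =
      if r1 ≠ r2 then (ufUnion q.2 u v, t + w) else (q.2, t) := by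
    simp only [mstLoop]
    rw [← hpdef, ← hqdef, ha1, ha2]
  have hB : altLoop (c, t) (u, v, w) =
      if r1 ≠ r2 then (((relabel c r1 r2).insert u r2).insert v r2, t + w) else (c, t) := by
    simp only [altLoop]
    rw [hru, hrv]
  rw [hA, hB]
  by_cases hne : r1 = r2
  · simp only [hne, ne_eq, not_true_eq_false, if_false]
    exact ⟨by trivial, hgood2, he2, hflat, hcorr2⟩
  · simp only [ne_eq, hne, not_false_eq_true, if_true]
    refine ⟨by trivial, ?_⟩
    -- A's union: find v, then find u, then insert r1 ↦ r2
    obtain ⟨r2', n2', hn2', hp2', hr2'⟩ := hgood2 v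
    have hreach2q : Reach q.2 v r2 := hpres2 v r2 ⟨n2, hp2, hr2⟩
    have hr2eq : r2' = r2 := Reach_unique ⟨n2', hp2', hr2'⟩ hreach2q
    subst hr2eq
    obtain ⟨ha3, hb3, hc3, hd3, he3⟩ :=
      find_spec (q.2.size + 1) q.2 v n2' r2' (by omega) hp2' hr2' he2
    set q3 := ufFind (q.2.size + 1) q.2 v with hq3def
    have hpres3 : ∀ z s, Reach q.2 z s → Reach q3.2 z s := by
      intro z s ⟨m, h1, h2⟩
      obtain ⟨m', _, h3, h4⟩ := hb3 m z s h1 h2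
      exact ⟨m', h3, h4⟩
    have hgood3 : GoodA q3.2 := by
      intro z
      obtain ⟨s, m, hm, h1, h2⟩ := hgood2 z
      obtain ⟨m', hm', h3, h4⟩ := hb3 m z s h1 h2
      exact ⟨s, m', by omega, h3, h4⟩
    have hcorr3 : Corr q3.2 c := corr_of_preserve hgood2 hcorr2 hpres3
    obtain ⟨r1', n1', hn1', hp1', hr1'⟩ := hgood3 u
    have hreach1 : Reach q3.2 u r1 := hpres3 u r1 (hpres2 u r1 (hpres1 u r1 ⟨n1, hp1, hr1⟩))
    have hr1eq : r1' = r1 := Reach_unique ⟨n1', hp1', hr1'⟩ hreach1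
    subst hr1eq
    obtain ⟨ha4, hb4, hc4, hd4, he4⟩ :=
      find_spec (q3.2.size + 1) q3.2 u n1' r1' (by omega) hp1' hr1' he3
    set p4 := ufFind (q3.2.size + 1) q3.2 u with hp4def
    have hpres4 : ∀ z s, Reach q3.2 z s → Reach p4.2 z s := by
      intro z s ⟨m, h1, h2⟩
      obtain ⟨m', _, h3, h4⟩ := hb4 m z s h1 h2
      exact ⟨m', h3, h4⟩
    have hgood4 : GoodA p4.2 := by
      intro z
      obtain ⟨s, m, hm, h1, h2⟩ := hgood3 z
      obtain ⟨m', hm', h3, h4⟩ := hb4 m z s h1 h2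
      exact ⟨s, m', by omega, h3, h4⟩
    have hcorr4 : Corr p4.2 c := corr_of_preserve hgood3 hcorr3 hpres4
    have hUnion : ufUnion q.2 u v = p4.2.insert r1' q3.1 := by
      simp only [ufUnion]
      rw [← hq3def, ← hp4def, ha4]
    rw [hUnion, ha3]
    -- the final insert r1 ↦ r2 in A, relabel in B
    have hroot1 : isRoot p4.2 r1' := (hc4 r1').mpr ((hc3 r1').mpr ((hc2 r1').mpr ((hc1 r1').mpr hr1)))
    have hroot2 : isRoot p4.2 r2' := (hc4 r2').mpr ((hc3 r2').mpr hr2')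
    have hsz : p4.2.size = d.size := by rw [hd4, hd3, hd2, hd1]
    have hsz5 : (p4.2.insert r1' r2').size = d.size + 1 := by
      rw [PySem.Dict.size_insert, if_neg (by
        rw [not_contains_of_root_noself hroot1 he4]; simp)]
      rw [hsz]
    refine ⟨?_, ?_, ?_, ?_⟩
    · -- GoodA of the union result
      intro z
      obtain ⟨s, m, hm, h1, h2⟩ := hgood4 z
      obtain ⟨m', hm', h3, h4⟩ := union_shift hroot1 hroot2 hne m z s h1 h2
      refine ⟨if s = r1' then r2' else s, m', ?_, h3, h4⟩
      rw [hsz5]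
      have : p4.2.size = d.size := hsz
      omega
    · -- NoSelf
      intro k
      rw [PySem.Dict.get?_insert]
      by_cases hk : k = r1'
      · subst hk
        simp only [reduceIte]
        intro hcontra
        have : r2' = k := Option.some.inj hcontra
        exact hne this.symm
      · rw [if_neg hk]; exact he4 k
    · exact flatB_step hflat hru hrv hne
    · -- Corr
      intro x ρ hx
      obtain ⟨ρ0, m, hm, h1, h2⟩ := hgood4 x
      obtain ⟨m', hm', h3, h4⟩ := union_shift hroot1 hroot2 hne m x ρ0 h1 h2
      have hρ : ρ = if ρ0 = r1' then r2' else ρ0 := Reach_unique hx ⟨m', h3, h4⟩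
      have hc0 : c.getD x x = ρ0 := hcorr4 x ρ0 ⟨m, h1, h2⟩
      rw [getD_relabel_chain hflat hru hrv hne x, hc0, hρ]

theorem fold_sim :
    ∀ (l : List (Int × Int × Int)) (d c : PySem.Dict Int Int) (t1 t2 : Int),
      SimInv d c → t1 = t2 →
      (l.foldl mstLoop (d, t1)).2 = (l.foldl altLoop (c, t2)).2 := by
  intro l
  induction l with
  | nil => intro d c t1 t2 _ ht; simpa [List.foldl] using ht
  | cons h tl ih =>
    intro d c t1 t2 hinv ht
    subst ht
    obtain ⟨hsnd, hinv'⟩ := step_sim d c t1 h hinv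
    rw [List.foldl_cons, List.foldl_cons,
      show mstLoop (d, t1) h = ((mstLoop (d, t1) h).1, (mstLoop (d, t1) h).2) from rfl,
      show altLoop (c, t1) h = ((altLoop (c, t1) h).1, (altLoop (c, t1) h).2) from rfl]
    exact ih _ _ _ _ hinv' hsnd

theorem piter_empty (n : Nat) (x : Int) : piter (PySem.Dict.empty) n x = x := by
  induction n with
  | zero => rfl
  | succ n ih =>
    show piter PySem.Dict.empty n (par PySem.Dict.empty x) = x
    have hpar : par (PySem.Dict.empty : PySem.Dict Int Int) x = x := by
      simp [par, PySem.Dict.getD_eq_get?_getD, PySem.Dict.get?_empty]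
    rw [hpar]; exact ih

theorem inv_empty : SimInv PySem.Dict.empty PySem.Dict.empty := by
  refine ⟨?_, ?_, ?_, ?_⟩
  · intro x
    refine ⟨x, 0, Nat.zero_le _, rfl, ?_⟩
    simp [isRoot, par, PySem.Dict.getD_eq_get?_getD, PySem.Dict.get?_empty]
  · intro k
    rw [PySem.Dict.get?_empty]; simp
  · intro k v hk
    rw [PySem.Dict.get?_empty] at hk; simp at hk
  · intro x r ⟨n, h1, _⟩
    rw [piter_empty] at h1
    subst h1
    simp [PySem.Dict.getD_eq_get?_getD, PySem.Dict.get?_empty]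

-- ===== VERDICT (by name: the statement is the Claim_ definition above) =====
theorem mst_forest_spec : Claim_equal_mst_forest := by
  intro trees pairs _
  unfold Spec_mst_forest mst_forest mst_forest_alt
  exact fold_sim _ _ _ _ _ inv_empty rfl
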